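-- pv_equiv track=rewrite | github.com/JAAAACY/Codebook | mcp-server/src/tools/diff_validator.py | _find_context_in_file
-- ===== SOURCE A (Python) =====
-- def _find_context_in_file(
--
--     file_lines: list[str],
--     context_lines: list[str],
--     hint_start: int,
-- ) -> int | None:
--     """
--     在文件中查找上下文行序列的实际位置。
--
--     先在 hint_start 附近搜索（±20行），找不到再全文搜索。
--
--     Returns:
--         找到的起始行索引（0-based），或 None
--     """
--     if not context_lines:
--         return hint_start
--
--     first_context = context_lines[0].rstrip()
--
--     # 搜索窗口：先近后远
--     search_ranges = [
--         range(max(0, hint_start - 20), min(len(file_lines), hint_start + 20)),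
--         range(0, len(file_lines)),
--     ]
--
--     for search_range in search_ranges:
--         for start_idx in search_range:
--             if start_idx + len(context_lines) > len(file_lines):
--                 continue
--
--             if file_lines[start_idx].rstrip() != first_context:
--                 continue
--
--             # 检查后续行是否全部匹配
--             all_match = True
--             for j, ctx_line in enumerate(context_lines):
--                 if file_lines[start_idx + j].rstrip() != ctx_line.rstrip():
--                     all_match = False
--                     break
--
--             if all_match:
--                 return start_idx
--
--     return None
-- ===== SOURCE B (Python) =====
-- def _find_context_in_file(
--     file_lines: list[str],
--     context_lines: list[str],
--     hint_start: int,
-- ) -> int | None: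
--     # One pass: rstrip every line once, collect all match positions in a single
--     # left-to-right scan, then pick the first one inside the hint window, else
--     # the first one overall.
--     if not context_lines:
--         return hint_start
--
--     stripped = [ln.rstrip() for ln in file_lines]
--     ctx = [ln.rstrip() for ln in context_lines]
--     n = len(stripped)
--     m = len(ctx)
--
--     occs = [i for i in range(n - m + 1) if stripped[i:i + m] == ctx]
--
--     lo = max(0, hint_start - 20)
--     hi = min(n, hint_start + 20)
--     for p in occs:
--         if lo <= p < hi:
--             return p
--     return occs[0] if occs else None
-- ===== Notes on version B (the rewrite author's own statement) =====
-- stated objective: alternative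
-- what changed: B rstrips every line exactly once and computes all match positions in one left-to-right scan over the precomputed stripped lists, then picks the first position inside the hint window else the first overall, replacing A's two nested scans that re-rstrip file and context lines at every candidate position.
import Mathlib
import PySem

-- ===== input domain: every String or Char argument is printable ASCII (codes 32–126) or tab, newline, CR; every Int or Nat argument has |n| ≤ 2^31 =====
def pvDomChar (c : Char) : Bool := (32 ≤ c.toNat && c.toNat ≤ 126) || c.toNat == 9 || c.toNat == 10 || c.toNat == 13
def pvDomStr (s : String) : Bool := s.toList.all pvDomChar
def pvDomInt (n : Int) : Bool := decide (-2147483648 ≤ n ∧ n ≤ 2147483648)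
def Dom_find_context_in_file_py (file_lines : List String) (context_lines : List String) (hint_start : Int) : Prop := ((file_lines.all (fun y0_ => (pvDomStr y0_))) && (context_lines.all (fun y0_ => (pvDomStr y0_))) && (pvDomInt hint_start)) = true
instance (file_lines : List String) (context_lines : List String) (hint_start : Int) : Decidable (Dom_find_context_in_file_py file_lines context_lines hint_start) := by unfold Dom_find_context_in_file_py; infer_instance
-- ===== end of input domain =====

-- B rstrips every line once and collects all match positions in one scan, then picks the
-- first inside the hint window else the first overall; same result as A's two nested scans.

-- ===== PORT A =====
-- inner loop 'for j, ctx_line in enumerate(context_lines)': indices are in range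
-- whenever this is called (start_idx + len(context) ≤ len(file) is checked before),
-- so pyGetD with default "" is exact here.
def pvA_allMatch (file_lines : List String) (s : Int) : List (Int × String) → Bool
  | [] => true
  | (j, ctx_line) :: rest =>
      if PySem.Str.rstrip (PySem.List.pyGetD file_lines (s + j) "") ≠ PySem.Str.rstrip ctx_line then
        false
      else pvA_allMatch file_lines s rest

-- 'for start_idx in search_range: …' with the two continue-guards and the early return
def pvA_scan (file_lines : List String) (context_lines : List String) (first_context : String) :
    List Int → Option Int
  | [] => none
  | start_idx :: rest =>
      if start_idx + (context_lines.length : Int) > (file_lines.length : Int) then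
        pvA_scan file_lines context_lines first_context rest
      else if PySem.Str.rstrip (PySem.List.pyGetD file_lines start_idx "") ≠ first_context then
        pvA_scan file_lines context_lines first_context rest
      else if pvA_allMatch file_lines start_idx (PySem.List.enumerate context_lines 0) then
        some start_idx
      else
        pvA_scan file_lines context_lines first_context rest

-- 'for search_range in search_ranges: …'
def pvA_ranges (file_lines : List String) (context_lines : List String) (first_context : String) :
    List (List Int) → Option Int
  | [] => none
  | r :: rs =>
      match pvA_scan file_lines context_lines first_context r with
      | some i => some i
      | none => pvA_ranges file_lines context_lines first_context rs

def find_context_in_file_py (file_lines : List String) (context_lines : List String) (hint_start : Int) : Option Int :=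
  if context_lines = [] then some hint_start
  else
    let first_context := PySem.Str.rstrip (PySem.List.pyGetD context_lines 0 "")
    let search_ranges :=
      [PySem.List.pyRange (max 0 (hint_start - 20)) (min (file_lines.length : Int) (hint_start + 20)) 1,
       PySem.List.pyRange 0 (file_lines.length : Int) 1]
    pvA_ranges file_lines context_lines first_context search_ranges

-- ===== PORT B =====
def find_context_in_file_py_alt (file_lines : List String) (context_lines : List String) (hint_start : Int) : Option Int :=
  if context_lines = [] then some hint_start
  else
    let stripped := file_lines.map PySem.Str.rstrip
    let ctx := context_lines.map PySem.Str.rstrip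
    let n : Int := stripped.length
    let m : Int := ctx.length
    let occs := (PySem.List.pyRange 0 (n - m + 1) 1).filter
        (fun i => PySem.List.slice stripped (some i) (some (i + m)) == ctx)
    let lo := max 0 (hint_start - 20)
    let hi := min n (hint_start + 20)
    match occs.find? (fun p => decide (lo ≤ p) && decide (p < hi)) with
    | some p => some p
    | none => occs.head?

-- ===== PRECONDITION & SPEC =====
def Spec_find_context_in_file_py (file_lines : List String) (context_lines : List String) (hint_start : Int) (out : Option Int) : Prop := out = find_context_in_file_py_alt file_lines context_lines hint_start
instance (file_lines : List String) (context_lines : List String) (hint_start : Int) (out : Option Int) : Decidable (Spec_find_context_in_file_py file_lines context_lines hint_start out) := by unfold Spec_find_context_in_file_py; infer_instance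

-- ===== CLAIM (what is proved, stated in full; the proofs are below) =====
def Claim_equal_find_context_in_file_py : Prop := ∀ (file_lines : List String) (context_lines : List String) (hint_start : Int), Dom_find_context_in_file_py file_lines context_lines hint_start → Spec_find_context_in_file_py file_lines context_lines hint_start (find_context_in_file_py file_lines context_lines hint_start)

-- ===== LEMMAS AND PROOFS =====

lemma find?_filter' (l : List Int) (f g : Int → Bool) :
    (l.filter f).find? g = l.find? (fun x => f x && g x) := by
  induction l with
  | nil => rfl
  | cons x xs ih =>
    by_cases hf : f x = true
    · by_cases hg : g x = true
      · simp [hf, List.find?, hg]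
      · simp only [Bool.not_eq_true] at hg
        simp [hf, List.find?, hg, ih]
    · simp only [Bool.not_eq_true] at hf
      simp [hf, List.find?, ih]

lemma head?_eq_find?_true (l : List Int) : l.head? = l.find? (fun _ => true) := by
  cases l <;> simp [List.find?]

lemma pyfind_some (p : Int → Bool) (b : Int) : ∀ (N : ℕ) (a j : Int), (b - a).toNat ≤ N →
    ((PySem.List.pyRange a b 1).find? p = some j ↔
      (a ≤ j ∧ j < b ∧ p j = true ∧ ∀ i, a ≤ i → i < j → p i = false)) := by
  intro N
  induction N with
  | zero =>
    intro a j h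
    have hba : b ≤ a := by omega
    rw [PySem.List.pyRange_one_eq_nil hba]
    simp only [List.find?]
    constructor
    · intro h; cases h
    · rintro ⟨h1, h2, _⟩; omega
  | succ N ih =>
    intro a j h
    by_cases hab : a < b
    · rw [PySem.List.pyRange_one_cons hab]
      simp only [List.find?]
      by_cases hpa : p a = true
      · simp only [hpa]  -- find? gives some a
        constructor
        · rintro ⟨rfl⟩
          exact ⟨le_refl a, hab, hpa, fun i h1 h2 => by omega⟩
        · rintro ⟨h1, h2, h3, hmin⟩
          have : j = a := by
            by_contra hne
            have : p a = false := hmin a le_rfl (by omega)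
            simp [hpa] at this
          simp [this]
      · have hpa' : p a = false := by simpa using hpa
        simp only [hpa']
        rw [ih (a+1) j (by omega)]
        constructor
        · rintro ⟨h1, h2, h3, hmin⟩
          refine ⟨by omega, h2, h3, fun i hi1 hi2 => ?_⟩
          rcases eq_or_lt_of_le hi1 with rfl | hlt
          · exact hpa'
          · exact hmin i (by omega) hi2
        · rintro ⟨h1, h2, h3, hmin⟩
          have hja : j ≠ a := by rintro rfl; simp [hpa'] at h3
          exact ⟨by omega, h2, h3, fun i hi1 hi2 => hmin i (by omega) hi2⟩
    · rw [PySem.List.pyRange_one_eq_nil (by omega)]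
      simp only [List.find?]
      constructor
      · intro h; cases h
      · rintro ⟨h1, h2, _⟩; omega

lemma pyfind_none (p : Int → Bool) (a b : Int) :
    (PySem.List.pyRange a b 1).find? p = none ↔ ∀ i, a ≤ i → i < b → p i = false := by
  rw [List.find?_eq_none]
  constructor
  · intro h i h1 h2
    have := h i (by rw [PySem.List.mem_pyRange_one]; exact ⟨h1, h2⟩)
    simpa using this
  · intro h x hx
    rw [PySem.List.mem_pyRange_one] at hx
    simp [h x hx.1 hx.2]

lemma pyfind_congr (p q : Int → Bool) (a b c d : Int)
    (H : ∀ i, (a ≤ i ∧ i < b ∧ p i = true) ↔ (c ≤ i ∧ i < d ∧ q i = true)) :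
    (PySem.List.pyRange a b 1).find? p = (PySem.List.pyRange c d 1).find? q := by
  cases hL : (PySem.List.pyRange a b 1).find? p with
  | none =>
    rw [pyfind_none] at hL
    symm; rw [pyfind_none]
    intro i h1 h2
    by_contra hq
    have hq' : q i = true := by simpa using hq
    obtain ⟨ha, hb, hp⟩ := (H i).mpr ⟨h1, h2, hq'⟩
    rw [hL i ha hb] at hp; cases hp
  | some j =>
    rw [pyfind_some p b (b - a).toNat a j le_rfl] at hL
    obtain ⟨h1, h2, h3, hmin⟩ := hL
    obtain ⟨hc, hd, hq⟩ := (H j).mp ⟨h1, h2, h3⟩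
    symm
    rw [pyfind_some q d (d - c).toNat c j le_rfl]
    refine ⟨hc, hd, hq, fun i hi1 hi2 => ?_⟩
    by_contra hqi
    have hqi' : q i = true := by simpa using hqi
    obtain ⟨ha, hb, hp⟩ := (H i).mpr ⟨hi1, by omega, hqi'⟩
    rw [hmin i ha hi2] at hp; cases hp


def pvA_pred (file_lines context_lines : List String) (first_context : String) (i : Int) : Bool :=
  decide (i + (context_lines.length : Int) ≤ (file_lines.length : Int)) &&
  (decide (PySem.Str.rstrip (PySem.List.pyGetD file_lines i "") = first_context) &&
   pvA_allMatch file_lines i (PySem.List.enumerate context_lines 0))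

lemma scan_eq_find? (file ctx : List String) (first : String) (r : List Int) :
    pvA_scan file ctx first r = r.find? (pvA_pred file ctx first) := by
  induction r with
  | nil => rfl
  | cons i rest ih =>
    simp only [pvA_scan, List.find?]
    by_cases h1 : i + (ctx.length : Int) > (file.length : Int)
    · have : pvA_pred file ctx first i = false := by
        simp [pvA_pred]; omega
      simp [h1, this, ih]
    · by_cases h2 : PySem.Str.rstrip (PySem.List.pyGetD file i "") ≠ first
      · have : pvA_pred file ctx first i = false := by simp [pvA_pred, h2]
        simp [h1, h2, this, ih]
      · by_cases h3 : pvA_allMatch file i (PySem.List.enumerate ctx 0) = true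
        · have : pvA_pred file ctx first i = true := by
            push Not at h1 h2; simp [pvA_pred, h1, h2, h3]
          simp [h1, h2, h3, this]
        · have : pvA_pred file ctx first i = false := by
            simp only [Bool.not_eq_true] at h3; simp [pvA_pred, h3]
          simp [h1, h2, h3, this, ih]

lemma allMatch_iff (file : List String) (i : Int) :
    ∀ (ctx' : List String) (j : Int),
      (pvA_allMatch file i (PySem.List.enumerate ctx' j) = true ↔
        ∀ k : ℕ, (hk : k < ctx'.length) →
          PySem.Str.rstrip (PySem.List.pyGetD file (i + j + k) "") = PySem.Str.rstrip ctx'[k]) := by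
  intro ctx'
  induction ctx' with
  | nil => intro j; simp [PySem.List.enumerate_nil, pvA_allMatch]
  | cons c cs ih =>
    intro j
    rw [PySem.List.enumerate_cons]
    simp only [pvA_allMatch]
    by_cases h0 : PySem.Str.rstrip (PySem.List.pyGetD file (i + j) "") ≠ PySem.Str.rstrip c
    · rw [if_pos h0]
      constructor
      · intro h; cases h
      · intro h
        exfalso; apply h0
        have := h 0 (by simp)
        simpa using this
    · rw [if_neg h0]
      rw [ih (j+1)]
      push Not at h0
      constructor
      · intro h k hk
        cases k with
        | zero => simpa using h0
        | succ k =>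
          have := h k (by simpa using hk)
          have heq : i + j + ((k:ℕ)+1:ℕ) = i + (j+1) + (k:ℕ) := by push_cast; ring
          rw [heq]
          simpa using this
      · intro h k hk
        have := h (k+1) (by simpa using hk)
        have heq : i + j + ((k:ℕ)+1:ℕ) = i + (j+1) + (k:ℕ) := by push_cast; ring
        rw [heq] at this
        simpa using this

lemma mat_iff (file ctx : List String) (i : Int) (h0 : 0 ≤ i)
    (hm : i + (ctx.length : Int) ≤ (file.length : Int)) :
    ((PySem.List.slice (file.map PySem.Str.rstrip) (some i) (some (i + (ctx.length : Int))) ==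
        ctx.map PySem.Str.rstrip) = true ↔
      ∀ k : ℕ, k < ctx.length →
        PySem.Str.rstrip (PySem.List.pyGetD file (i + k) "") = PySem.Str.rstrip ctx[k]!) := by
  obtain ⟨t, rfl⟩ : ∃ t : ℕ, i = (t : Int) := ⟨i.toNat, (Int.toNat_of_nonneg h0).symm⟩
  have hm' : t + ctx.length ≤ file.length := by exact_mod_cast hm
  rw [PySem.List.slice_natCast_add, beq_iff_eq]
  have hlen : (((file.map PySem.Str.rstrip).drop t).take ctx.length).length = ctx.length := by
    simp; omega
  constructor
  · intro heq k hk
    have h1 : (((file.map PySem.Str.rstrip).drop t).take ctx.length)[k]'(by omega) =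
        (ctx.map PySem.Str.rstrip)[k]'(by simpa using hk) := by
      exact List.getElem_of_eq heq _
    rw [List.getElem_take, List.getElem_drop, List.getElem_map, List.getElem_map] at h1
    rw [PySem.List.pyGetD_eq_getElem file "" (by omega) (by omega)]
    have ht : ((t : Int) + (k : Int)).toNat = t + k := by omega
    rw [getElem!_pos ctx k hk]
    simp only [ht]
    exact h1
  · intro hall
    apply List.ext_getElem (by simpa using hlen)
    intro k hk1 hk2
    rw [hlen] at hk1
    rw [List.getElem_take, List.getElem_drop, List.getElem_map, List.getElem_map]
    have := hall k hk1
    rw [PySem.List.pyGetD_eq_getElem file "" (by omega) (by omega)] at this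
    have ht : ((t : Int) + (k : Int)).toNat = t + k := by omega
    rw [getElem!_pos ctx k hk1] at this
    simp only [ht] at this
    exact this

lemma allMatch_eq_mat (file ctx : List String) (i : Int) (h0 : 0 ≤ i)
    (hm : i + (ctx.length : Int) ≤ (file.length : Int)) :
    pvA_allMatch file i (PySem.List.enumerate ctx 0) =
      (PySem.List.slice (file.map PySem.Str.rstrip) (some i) (some (i + (ctx.length : Int))) ==
        ctx.map PySem.Str.rstrip) := by
  have h1 := allMatch_iff file i ctx 0
  simp only [add_zero] at h1
  have h2 := mat_iff file ctx i h0 hm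
  cases hmat : (PySem.List.slice (file.map PySem.Str.rstrip) (some i) (some (i + (ctx.length : Int))) ==
        ctx.map PySem.Str.rstrip) with
  | true =>
    rw [h1]
    intro k hk
    have := h2.mp hmat k hk
    rwa [getElem!_pos ctx k hk] at this
  | false =>
    rw [← Bool.not_eq_true] at hmat ⊢
    intro hcontra
    apply hmat
    rw [h2]
    intro k hk
    rw [getElem!_pos ctx k hk]
    exact h1.mp hcontra k hk

lemma pred_eq (file ctx : List String) (hne : ctx ≠ []) (i : Int) (h0 : 0 ≤ i) :
    pvA_pred file ctx (PySem.Str.rstrip (PySem.List.pyGetD ctx 0 "")) i =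
      (decide (i + (ctx.length : Int) ≤ (file.length : Int)) &&
       (PySem.List.slice (file.map PySem.Str.rstrip) (some i) (some (i + (ctx.length : Int))) ==
         ctx.map PySem.Str.rstrip)) := by
  unfold pvA_pred
  by_cases hbd : i + (ctx.length : Int) ≤ (file.length : Int)
  · simp only [hbd, decide_true, Bool.true_and]
    rw [allMatch_eq_mat file ctx i h0 hbd]
    cases hmat : (PySem.List.slice (file.map PySem.Str.rstrip) (some i) (some (i + (ctx.length : Int))) ==
        ctx.map PySem.Str.rstrip) with
    | false => simp
    | true =>
      simp only [Bool.and_true]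
      obtain ⟨c, cs, rfl⟩ : ∃ c cs, ctx = c :: cs := by
        cases ctx with
        | nil => exact absurd rfl hne
        | cons c cs => exact ⟨c, cs, rfl⟩
      have hk0 := (mat_iff file (c :: cs) i h0 hbd).mp hmat 0 (by simp)
      simp only [Nat.cast_zero, add_zero] at hk0
      have hget : PySem.List.pyGetD (c :: cs) 0 "" = c := PySem.List.pyGetD_zero_cons c cs ""
      rw [hget]
      have : (c :: cs)[0]! = c := by
        rw [getElem!_pos (c :: cs) 0 (by simp)]; rfl
      rw [this] at hk0
      simp [hk0]
  · simp [hbd]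

-- ===== VERDICT (by name: the statement is the Claim_ definition above) =====
theorem find_context_in_file_py_spec : Claim_equal_find_context_in_file_py := by
  intro file ctx h _
  unfold Spec_find_context_in_file_py
  by_cases hne : ctx = []
  · simp [find_context_in_file_py, find_context_in_file_py_alt, hne]
  · unfold find_context_in_file_py find_context_in_file_py_alt
    rw [if_neg hne, if_neg hne]
    simp only [List.length_map, pvA_ranges, scan_eq_find?, find?_filter', head?_eq_find?_true,
      Bool.and_true]
    have hM1 : 1 ≤ (ctx.length : Int) := by
      cases ctx with
      | nil => exact absurd rfl hne
      | cons c cs => simp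
    have hlo : (0 : Int) ≤ max 0 (h - 20) := le_max_left _ _
    have hw :
        (PySem.List.pyRange (max 0 (h - 20)) (min (file.length : Int) (h + 20)) 1).find?
            (pvA_pred file ctx (PySem.Str.rstrip (PySem.List.pyGetD ctx 0 ""))) =
        (PySem.List.pyRange 0 ((file.length : Int) - (ctx.length : Int) + 1) 1).find?
            (fun i =>
              (PySem.List.slice (file.map PySem.Str.rstrip) (some i) (some (i + (ctx.length : Int))) ==
                ctx.map PySem.Str.rstrip) &&
              (decide (max 0 (h - 20) ≤ i) && decide (i < min (file.length : Int) (h + 20)))) := by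
      apply pyfind_congr
      intro i
      constructor
      · rintro ⟨h1, h2, h3⟩
        rw [pred_eq file ctx hne i (by omega)] at h3
        simp only [Bool.and_eq_true, decide_eq_true_eq] at h3 ⊢
        exact ⟨by omega, by omega, h3.2, by omega, by omega⟩
      · rintro ⟨h1, h2, h3⟩
        simp only [Bool.and_eq_true, decide_eq_true_eq] at h3
        refine ⟨by omega, by omega, ?_⟩
        rw [pred_eq file ctx hne i (by omega)]
        simp only [Bool.and_eq_true, decide_eq_true_eq]
        exact ⟨by omega, h3.1⟩
    have hf :
        (PySem.List.pyRange 0 (file.length : Int) 1).find?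
            (pvA_pred file ctx (PySem.Str.rstrip (PySem.List.pyGetD ctx 0 ""))) =
        (PySem.List.pyRange 0 ((file.length : Int) - (ctx.length : Int) + 1) 1).find?
            (fun i =>
              (PySem.List.slice (file.map PySem.Str.rstrip) (some i) (some (i + (ctx.length : Int))) ==
                ctx.map PySem.Str.rstrip)) := by
      apply pyfind_congr
      intro i
      constructor
      · rintro ⟨h1, h2, h3⟩
        rw [pred_eq file ctx hne i (by omega)] at h3
        simp only [Bool.and_eq_true, decide_eq_true_eq] at h3 ⊢
        exact ⟨by omega, by omega, h3.2⟩
      · rintro ⟨h1, h2, h3⟩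
        refine ⟨by omega, by omega, ?_⟩
        rw [pred_eq file ctx hne i (by omega)]
        simp only [Bool.and_eq_true, decide_eq_true_eq]
        exact ⟨by omega, h3⟩ -- h3 : mat = true
    rw [hw, hf]
    cases hq1 : (PySem.List.pyRange 0 ((file.length : Int) - (ctx.length : Int) + 1) 1).find?
        (fun i =>
          (PySem.List.slice (file.map PySem.Str.rstrip) (some i) (some (i + (ctx.length : Int))) ==
            ctx.map PySem.Str.rstrip) &&
          (decide (max 0 (h - 20) ≤ i) && decide (i < min (file.length : Int) (h + 20)))) with
    | some p => rfl
    | none =>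
      cases hq2 : (PySem.List.pyRange 0 ((file.length : Int) - (ctx.length : Int) + 1) 1).find?
          (fun i =>
            (PySem.List.slice (file.map PySem.Str.rstrip) (some i) (some (i + (ctx.length : Int))) ==
              ctx.map PySem.Str.rstrip)) with
      | some p => rfl
      | none => rfl
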